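-- pv_equiv track=rewrite | github.com/TristanBilot/deepiler | deepiler/preprocessing.py | postprocess_prediction
-- ===== SOURCE A (Python) =====
-- def postprocess_prediction(
--
--     c_code: str,
-- ) -> str:
--     """Apply preprocessing on the raw assembly code.
--     Mainly apply space between tokens in order to isolate them.
--     """
--
--     def postprocess_c(c_code: str) -> str:
--         tokens = ['=', '(', ')', ';', ',']
--         for tok in tokens:
--             c_code = c_code.replace(f' {tok}', tok)
--             c_code = c_code.replace(f'{tok} ', tok)
--         return c_code
--
--     return postprocess_c(c_code)
-- ===== SOURCE B (Python) =====
-- def postprocess_prediction(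
--     c_code: str,
-- ) -> str:
--     """Single left-to-right pass: drop each space whose original neighbor
--     (previous or next character of the input) is a C punctuation token."""
--     toks = ('=', '(', ')', ';', ',')
--     prevs = [None] + list(c_code)
--     nexts = list(c_code[1:]) + [None]
--     return ''.join(c for p, c, nx in zip(prevs, c_code, nexts)
--                    if not (c == ' ' and (p in toks or nx in toks)))
-- ===== Notes on version B (the rewrite author's own statement) =====
-- stated objective: simpler
-- what changed: Replaced ten chained str.replace passes (two per punctuation token) by a single left-to-right comprehension over (prev, char, next) triples of the original string that drops each space whose original neighbor is a punctuation token.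
import Mathlib
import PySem

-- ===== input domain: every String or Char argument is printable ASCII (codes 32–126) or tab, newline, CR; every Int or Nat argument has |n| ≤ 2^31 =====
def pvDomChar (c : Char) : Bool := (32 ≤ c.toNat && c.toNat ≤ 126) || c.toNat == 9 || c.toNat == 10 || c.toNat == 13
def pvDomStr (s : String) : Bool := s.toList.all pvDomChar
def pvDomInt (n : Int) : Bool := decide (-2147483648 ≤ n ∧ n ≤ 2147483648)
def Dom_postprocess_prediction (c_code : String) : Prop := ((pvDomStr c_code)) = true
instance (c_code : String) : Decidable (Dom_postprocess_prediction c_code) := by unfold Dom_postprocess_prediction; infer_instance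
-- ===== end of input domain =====

-- B replaces A's ten chained str.replace passes by one left-to-right scan that drops each
-- space whose original neighbor is a punctuation token (objective: simpler single pass).

-- ===== PORT A =====
def postprocess_prediction (c_code : String) : String :=
  (["=", "(", ")", ";", ","] : List String).foldl
    (fun s tok => PySem.Str.replace (PySem.Str.replace s (" " ++ tok) tok) (tok ++ " ") tok)
    c_code

-- ===== PORT B =====
def postprocess_prediction_alt (c_code : String) : String :=
  let toks : List Char := ['=', '(', ')', ';', ',']
  let cs := c_code.toList
  let prevs : List (Option Char) := none :: cs.map some
  let nexts : List (Option Char) := (PySem.List.slice cs (some 1) none).map some ++ [none]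
  String.ofList
    (((prevs.zip (cs.zip nexts)).filter (fun pcn =>
        !(pcn.2.1 == ' ' &&
          (pcn.1.elim false (toks.contains ·) || pcn.2.2.elim false (toks.contains ·))))).map
      (fun pcn => pcn.2.1))

-- ===== PRECONDITION & SPEC =====
def Spec_postprocess_prediction (c_code : String) (out : String) : Prop := out = postprocess_prediction_alt c_code
instance (c_code : String) (out : String) : Decidable (Spec_postprocess_prediction c_code out) := by unfold Spec_postprocess_prediction; infer_instance

-- ===== CLAIM (what is proved, stated in full; the proofs are below) =====
def Claim_equal_postprocess_prediction : Prop := ∀ (c_code : String), Dom_postprocess_prediction c_code → Spec_postprocess_prediction c_code (postprocess_prediction c_code)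

-- ===== LEMMAS AND PROOFS =====

def optB (P : Char → Bool) : Option Char → Bool
  | none => false
  | some c => P c

def scrub (L R : Char → Bool) : Option Char → List Char → List Char
  | _, [] => []
  | p, c :: r =>
      if c == ' ' && (optB L p || optB R r.head?) then scrub L R (some c) r
      else c :: scrub L R (some c) r

lemma optB_falseFn (o : Option Char) : optB (fun _ => false) o = false := by
  cases o <;> rfl

lemma optB_mono {P Q : Char → Bool} (h : ∀ c, P c = true → Q c = true)
    (o : Option Char) (ho : optB P o = true) : optB Q o = true := by
  cases o with
  | none => simp [optB] at ho
  | some c => exact h c ho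

lemma scrub_false (p : Option Char) (l : List Char) :
    scrub (fun _ => false) (fun _ => false) p l = l := by
  induction l generalizing p with
  | nil => rfl
  | cons c r ih => simp [scrub, optB_falseFn, ih]

lemma scrub_congr {L R L' R' : Char → Bool} (hL : ∀ c, L c = L' c) (hR : ∀ c, R c = R' c)
    (p : Option Char) (l : List Char) : scrub L R p l = scrub L' R' p l := by
  induction l generalizing p with
  | nil => rfl
  | cons c r ih =>
      have h1 : optB L p = optB L' p := by cases p <;> simp [optB, hL]
      have h2 : optB R r.head? = optB R' r.head? := by cases r.head? <;> simp [optB, hR]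
      simp only [scrub, h1, h2, ih]

lemma scrub_head {L R : Char → Bool} (hR : R ' ' = false) {p : Option Char}
    (hp : optB L p = false) (l : List Char) (x : Char)
    (h : (scrub L R p l).head? = some x) : l.head? = some x ∨ R x = true := by
  cases l with
  | nil => simp [scrub] at h
  | cons c r =>
      by_cases hc : (c == ' ' && (optB L p || optB R r.head?)) = true
      · -- c removed: c = ' ', and since optB L p = false, next ∈ R
        have hcsp : c = ' ' := by simpa using (Bool.and_eq_true_iff.mp hc).1
        have hnext : optB R r.head? = true := by
          have := (Bool.and_eq_true_iff.mp hc).2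
          simpa [hp] using this
        cases r with
        | nil => simp [optB] at hnext
        | cons e r2 =>
            have he : R e = true := by simpa [optB] using hnext
            have hene : e ≠ ' ' := by intro he'; rw [he'] at he; simp [hR] at he
            have : scrub L R p (c :: e :: r2) = scrub L R (some c) (e :: r2) := by
              simp only [scrub, hc, if_true]
            rw [this] at h
            have hkeep : (e == ' ' && (optB L (some c) || optB R r2.head?)) = false := by
              simp [hene]
            rw [scrub, hkeep] at h
            simp at h
            right; exact h ▸ he
      · have heq : scrub L R p (c :: r) = c :: scrub L R (some c) r := by
          rw [scrub, if_neg]; simpa using hc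
        rw [heq] at h
        simp at h
        left; simp [h]

def rpl (a b w : Char) : List Char → List Char
  | [] => []
  | [c] => [c]
  | c :: d :: r => if c == a && d == b then w :: rpl a b w r else c :: rpl a b w (d :: r)

lemma go_eq (a b w : Char) : ∀ (n : Nat) (l acc : List Char), l.length ≤ n →
    PySem.Chars.replace.go [a, b] [w] n l acc = acc.reverse ++ rpl a b w l := by
  intro n
  induction n with
  | zero =>
    intro l acc h
    have : l = [] := List.eq_nil_of_length_eq_zero (Nat.le_zero.mp h)
    subst this
    simp [PySem.Chars.replace.go, rpl]
  | succ n ih =>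
    intro l acc h
    match l with
    | [] => simp [PySem.Chars.replace.go, rpl]
    | [c] =>
      have hpre : ([a,b].isPrefixOf [c]) = false := by
        simp [List.isPrefixOf]
      simp only [PySem.Chars.replace.go, hpre, Bool.false_eq_true, if_false]
      rw [ih [] (c :: acc) (by simp)]
      simp [rpl]
    | c :: d :: r =>
      have hpre : ([a,b].isPrefixOf (c :: d :: r)) = (a == c && b == d) := by
        simp [List.isPrefixOf]
      simp only [PySem.Chars.replace.go, hpre]
      by_cases h1 : a = c ∧ b = d
      · obtain ⟨h1a, h1b⟩ := h1
        subst h1a; subst h1b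
        simp only [beq_self_eq_true, Bool.and_self, if_true]
        rw [ih (List.drop [a,b].length (a :: b :: r)) ([w].reverse ++ acc)
            (by simp at h ⊢; omega)]
        rw [rpl]
        simp
      · have hf : (a == c && b == d) = false := by
          rcases not_and_or.mp h1 with h2 | h2 <;> simp [h2]
        simp only [hf, Bool.false_eq_true, if_false]
        rw [ih (d :: r) (c :: acc) (by simp at h ⊢; omega)]
        have hf2 : (c == a && d == b) = false := by
          rcases not_and_or.mp h1 with h2 | h2 <;> simp <;>
            intro hx <;> [exact absurd hx.symm h2; exact fun hd => h2 hd.symm]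
        rw [rpl, hf2]
        simp

lemma replace_pair (a b w : Char) (l : List Char) :
    PySem.Chars.replace l [a, b] [w] = rpl a b w l := by
  have := go_eq a b w l.length l [] le_rfl
  simpa [PySem.Chars.replace] using this

lemma scrub_cons_pos {L R : Char → Bool} {p : Option Char} {c : Char} {r : List Char}
    (h : (c == ' ' && (optB L p || optB R r.head?)) = true) :
    scrub L R p (c :: r) = scrub L R (some c) r := by rw [scrub, if_pos h]

lemma scrub_cons_neg {L R : Char → Bool} {p : Option Char} {c : Char} {r : List Char}
    (h : (c == ' ' && (optB L p || optB R r.head?)) = false) :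
    scrub L R p (c :: r) = c :: scrub L R (some c) r := by
  rw [scrub, if_neg]; simp [h]

lemma rpl_match (a b w : Char) (r : List Char) :
    rpl a b w (a :: b :: r) = w :: rpl a b w r := by simp [rpl]

lemma rpl_cons (a b w c : Char) (X : List Char) (h : c ≠ a ∨ X.head? ≠ some b) :
    rpl a b w (c :: X) = c :: rpl a b w X := by
  cases X with
  | nil => simp [rpl]
  | cons y X2 =>
      rw [rpl, if_neg]
      simp only [Bool.and_eq_true, beq_iff_eq]
      rcases h with h | h
      · exact fun hx => h hx.1
      · exact fun hx => h (by simp [hx.2])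

lemma rpl_scrub_right (L R : Char → Bool) (t : Char) (hL : L ' ' = false)
    (hR : R ' ' = false) (hRt : R t = false) (ht : t ≠ ' ') :
    ∀ (n : Nat) (l : List Char) (p : Option Char), l.length ≤ n →
      rpl ' ' t t (scrub L R p l) = scrub L (fun c => R c || c == t) p l := by
  intro n
  induction n with
  | zero =>
      intro l p h
      have : l = [] := List.eq_nil_of_length_eq_zero (Nat.le_zero.mp h)
      subst this; simp [scrub, rpl]
  | succ n ih =>
      intro l p h
      cases l with
      | nil => simp [scrub, rpl]
      | cons c r =>
          by_cases hco : (c == ' ' && (optB L p || optB R r.head?)) = true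
          · -- removed under old R; also removed under new R
            have hcn : (c == ' ' && (optB L p || optB (fun c => R c || c == t) r.head?)) = true := by
              rcases Bool.and_eq_true_iff.mp hco with ⟨h1, h2⟩
              rcases Bool.or_eq_true_iff.mp h2 with h3 | h3
              · simp [h1, h3]
              · have : optB (fun c => R c || c == t) r.head? = true :=
                  optB_mono (fun c hc => by simp [hc]) _ h3
                simp [h1, this]
            rw [scrub_cons_pos hco, scrub_cons_pos hcn]
            exact ih r (some c) (by simpa using Nat.le_of_succ_le_succ (by simpa using h))
          · have hkeep := Bool.eq_false_iff.mpr hco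
            rw [scrub_cons_neg (Bool.not_eq_true _ ▸ (by simpa using hco))]
            by_cases hsp : c = ' '
            · subst hsp
              have hkf : optB L p = false ∧ optB R r.head? = false := by
                simpa using hkeep
              by_cases hht : r.head? = some t
              · -- next char is t: the space is dropped by rpl and by the new scrub
                cases r with
                | nil => simp at hht
                | cons d r2 =>
                    have hd : d = t := by simpa using hht
                    have hcn : (' ' == ' ' && (optB L p ||
                        optB (fun c => R c || c == t) (d :: r2).head?)) = true := by
                      simp [optB, hd]
                    rw [scrub_cons_pos hcn]
                    have h1 : scrub L R (some ' ') (d :: r2)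
                        = d :: scrub L R (some d) r2 :=
                      scrub_cons_neg (by simp [hd, ht])
                    have h2 : scrub L (fun c => R c || c == t) (some ' ') (d :: r2)
                        = d :: scrub L (fun c => R c || c == t) (some d) r2 :=
                      scrub_cons_neg (by simp [hd, ht])
                    rw [h1, h2, hd, rpl_match]
                    rw [ih r2 (some t) (by simp at h; omega)]
              · -- next char is not t: the space survives on both sides
                have hcn : (' ' == ' ' && (optB L p ||
                    optB (fun c => R c || c == t) r.head?)) = false := by
                  cases hy : r.head? with
                  | none => simp [optB]; exact hkf.1
                  | some y =>
                      have hRy : R y = false := by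
                        have := hkf.2; rw [hy] at this; simpa [optB] using this
                      have hyt : ¬ (y = t) := fun he => hht (by rw [hy, he])
                      simp [optB, hRy, hyt]; exact hkf.1
                rw [scrub_cons_neg hcn]
                have hXhead : ∀ x, (scrub L R (some ' ') r).head? = some x → x ≠ t := by
                  intro x hx he
                  subst he
                  rcases scrub_head hR (by simpa [optB] using hL) r x hx with h1 | h1
                  · exact hht h1
                  · rw [hRt] at h1; exact Bool.false_ne_true h1
                rw [rpl_cons _ _ _ _ _ (Or.inr (by
                  cases hX : (scrub L R (some ' ') r).head? with
                  | none => simp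
                  | some x => simpa using hXhead x hX))]
                rw [ih r (some ' ') (by simpa using Nat.le_of_succ_le_succ (by simpa using h))]
            · -- c not a space: kept on both sides, rpl passes over
              have hcn : (c == ' ' && (optB L p || optB (fun c => R c || c == t) r.head?)) = false := by
                simp [hsp]
              rw [scrub_cons_neg hcn]
              rw [rpl_cons _ _ _ _ _ (Or.inl hsp)]
              rw [ih r (some c) (by simpa using Nat.le_of_succ_le_succ (by simpa using h))]

lemma rpl_scrub_left (L R : Char → Bool) (t : Char) (_hL : L ' ' = false)
    (hR : R ' ' = false) (hLt : L t = false) (ht : t ≠ ' ') :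
    ∀ (n : Nat) (l : List Char) (p : Option Char), l.length ≤ n →
      (p = some t → l.head? ≠ some ' ') →
      rpl t ' ' t (scrub L R p l) = scrub (fun c => L c || c == t) R p l := by
  intro n
  induction n with
  | zero =>
      intro l p h _
      have : l = [] := List.eq_nil_of_length_eq_zero (Nat.le_zero.mp h)
      subst this; simp [scrub, rpl]
  | succ n ih =>
      intro l p h hhd
      cases l with
      | nil => simp [scrub, rpl]
      | cons c r =>
          by_cases hsp : c = ' '
          · -- current char is a space; by hhd the previous char is not t
            subst hsp
            have hpt : p ≠ some t := fun hp => hhd hp rfl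
            have hLp : optB (fun c => L c || c == t) p = optB L p := by
              cases p with
              | none => rfl
              | some q =>
                  have : ¬ (q = t) := fun hq => hpt (by rw [hq])
                  simp [optB, this]
            by_cases hco : (' ' == ' ' && (optB L p || optB R r.head?)) = true
            · have hcn : (' ' == ' ' && (optB (fun c => L c || c == t) p
                  || optB R r.head?)) = true := by rw [hLp]; exact hco
              rw [scrub_cons_pos hco, scrub_cons_pos hcn]
              exact ih r (some ' ') (by simp at h; omega) (fun hx => absurd hx (by simp [Ne.symm ht]))
            · have hcn : (' ' == ' ' && (optB (fun c => L c || c == t) p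
                  || optB R r.head?)) = false := by
                rw [hLp]; simpa using hco
              rw [scrub_cons_neg (by simpa using hco), scrub_cons_neg hcn]
              rw [rpl_cons _ _ _ _ _ (Or.inl (Ne.symm ht))]
              rw [ih r (some ' ') (by simp at h; omega)
                  (fun hx => absurd hx (by simp [Ne.symm ht]))]
          · -- current char is not a space: kept on both sides
            have hco : (c == ' ' && (optB L p || optB R r.head?)) = false := by simp [hsp]
            have hcn : (c == ' ' && (optB (fun c => L c || c == t) p
                || optB R r.head?)) = false := by simp [hsp]
            rw [scrub_cons_neg hco, scrub_cons_neg hcn]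
            by_cases hct : c = t
            · subst hct
              -- the interesting case: c = t, look at the next char
              cases r with
              | nil => simp [scrub, rpl]
              | cons d r2 =>
                  by_cases hd : d = ' '
                  · subst hd
                    by_cases hnx : optB R r2.head? = true
                    · -- the space after t is already dropped by the old scrub
                      have hdo : (' ' == ' ' && (optB L (some c) || optB R r2.head?)) = true := by
                        simp [hnx]
                      have hdn : (' ' == ' ' && (optB (fun x => L x || x == c) (some c)
                          || optB R r2.head?)) = true := by simp [optB]
                      rw [scrub_cons_pos hdo, scrub_cons_pos hdn]
                      -- head of the remaining old scrub is a kept char in R, not a space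
                      cases r2 with
                      | nil => simp [optB] at hnx
                      | cons e r3 =>
                          have he : R e = true := by simpa [optB] using hnx
                          have hene : e ≠ ' ' := by
                            intro h'; rw [h'] at he; rw [hR] at he; exact Bool.false_ne_true he
                          have h1 : scrub L R (some ' ') (e :: r3)
                              = e :: scrub L R (some e) r3 :=
                            scrub_cons_neg (by simp [hene])
                          rw [h1, rpl_cons _ _ _ _ _ (Or.inr (by simp [hene]))]
                          rw [← h1]
                          rw [ih (e :: r3) (some ' ') (by simp only [List.length_cons] at h ⊢; omega)
                              (fun hx => absurd hx (by simp [Ne.symm ht]))]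
                    · -- the space after t survives the old scrub; rpl drops it
                      have hnx' : optB R r2.head? = false := by
                        simpa using hnx
                      have hdo : (' ' == ' ' && (optB L (some c) || optB R r2.head?)) = false := by
                        simp [optB, hLt]; exact hnx'
                      have hdn : (' ' == ' ' && (optB (fun x => L x || x == c) (some c)
                          || optB R r2.head?)) = true := by simp [optB]
                      rw [scrub_cons_pos hdn, scrub_cons_neg hdo, rpl_match]
                      rw [ih r2 (some ' ') (by simp only [List.length_cons] at h ⊢; omega)
                          (fun hx => absurd hx (by simp [Ne.symm ht]))]
                  · -- next char is not a space: rpl passes over t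
                    have hdr : scrub L R (some c) (d :: r2) = d :: scrub L R (some d) r2 :=
                      scrub_cons_neg (by simp [hd])
                    rw [hdr, rpl_cons _ _ _ _ _ (Or.inr (by simp [hd])), ← hdr]
                    rw [ih (d :: r2) (some c) (by simp only [List.length_cons] at h ⊢; omega)
                        (fun _ => by simpa using hd)]
            · rw [rpl_cons _ _ _ _ _ (Or.inl hct)]
              rw [ih r (some c) (by simp at h; omega)
                  (fun hx => absurd (by simpa using hx) hct)]

def ztrip (p : Option Char) (cs : List Char) : List (Option Char × Char × Option Char) :=
  (p :: cs.map some).zip (cs.zip ((cs.drop 1).map some ++ [none]))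

lemma ztrip_cons (p : Option Char) (c : Char) (r : List Char) :
    ztrip p (c :: r) = (p, (c, r.head?)) :: ztrip (some c) r := by
  cases r <;> simp [ztrip]

lemma zip_scrub (toks : List Char) : ∀ (cs : List Char) (p : Option Char),
    (((ztrip p cs).filter
        (fun pcn => !(pcn.2.1 == ' ' &&
          (pcn.1.elim false (toks.contains ·) || pcn.2.2.elim false (toks.contains ·))))).map
      (fun pcn => pcn.2.1))
    = scrub (fun c => toks.contains c) (fun c => toks.contains c) p cs := by
  intro cs
  induction cs with
  | nil => intro p; rfl
  | cons c r ih =>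
      intro p
      have hopt : ∀ o : Option Char,
          o.elim false (toks.contains ·) = optB (fun c => toks.contains c) o := by
        intro o; cases o <;> rfl
      rw [ztrip_cons, List.filter_cons]
      by_cases hc : (c == ' ' && (optB (fun c => toks.contains c) p
          || optB (fun c => toks.contains c) r.head?)) = true
      · rw [scrub_cons_pos hc]
        have : (!(c == ' ' && ((p.elim false (toks.contains ·))
            || (r.head?).elim false (toks.contains ·)))) = false := by
          rw [hopt, hopt]; simp only [hc, Bool.not_true]
        rw [this]
        simp only [Bool.false_eq_true, if_false]
        exact ih (some c)
      · rw [scrub_cons_neg (by simpa using hc)]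
        have : (!(c == ' ' && ((p.elim false (toks.contains ·))
            || (r.head?).elim false (toks.contains ·)))) = true := by
          rw [hopt, hopt]; simp only [Bool.not_eq_eq_eq_not, Bool.not_true]
          simpa using hc
        rw [this]
        simp only [if_true, List.map_cons]
        rw [ih (some c)]

lemma phase (L R : Char → Bool) (t : Char) (hL : L ' ' = false) (hR : R ' ' = false)
    (hRt : R t = false) (hLt : L t = false) (ht : t ≠ ' ') (cs l : List Char)
    (hl : l = scrub L R none cs) :
    rpl t ' ' t (rpl ' ' t t l)
      = scrub (fun c => L c || c == t) (fun c => R c || c == t) none cs := by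
  subst hl
  rw [rpl_scrub_right L R t hL hR hRt ht cs.length cs none le_rfl]
  rw [rpl_scrub_left L (fun c => R c || c == t) t hL
      (by simp [hR]; exact Ne.symm ht) hLt ht cs.length cs none le_rfl
      (by intro h; exact absurd h (by simp))]


lemma ports_agree (s : String) : postprocess_prediction s = postprocess_prediction_alt s := by
  have hA : postprocess_prediction s =
      String.ofList (rpl ',' ' ' ',' (rpl ' ' ',' ',' (rpl ';' ' ' ';' (rpl ' ' ';' ';'
        (rpl ')' ' ' ')' (rpl ' ' ')' ')' (rpl '(' ' ' '(' (rpl ' ' '(' '('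
        (rpl '=' ' ' '=' (rpl ' ' '=' '=' s.toList)))))))))) := by
    simp [postprocess_prediction, List.foldl, PySem.Str.replace, replace_pair]
  have h1 : rpl '=' ' ' '=' (rpl ' ' '=' '=' s.toList)
      = scrub (fun c => false || c == '=') (fun c => false || c == '=') none s.toList :=
    phase (fun _ => false) (fun _ => false) '=' rfl rfl rfl rfl (by decide)
      s.toList s.toList (scrub_false _ _).symm
  have h2 : rpl '(' ' ' '(' (rpl ' ' '(' '(' (rpl '=' ' ' '=' (rpl ' ' '=' '=' s.toList)))
      = scrub (fun c => (false || c == '=') || c == '(')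
          (fun c => (false || c == '=') || c == '(') none s.toList :=
    phase (fun c => false || c == '=') (fun c => false || c == '=') '(' (by decide) (by decide)
      (by decide) (by decide) (by decide) s.toList _ h1
  have h3 : rpl ')' ' ' ')' (rpl ' ' ')' ')'
        (rpl '(' ' ' '(' (rpl ' ' '(' '(' (rpl '=' ' ' '=' (rpl ' ' '=' '=' s.toList)))))
      = scrub (fun c => ((false || c == '=') || c == '(') || c == ')')
          (fun c => ((false || c == '=') || c == '(') || c == ')') none s.toList :=
    phase _ _ ')' (by decide) (by decide) (by decide) (by decide) (by decide) s.toList _ h2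
  have h4 : rpl ';' ' ' ';' (rpl ' ' ';' ';' (rpl ')' ' ' ')' (rpl ' ' ')' ')'
        (rpl '(' ' ' '(' (rpl ' ' '(' '(' (rpl '=' ' ' '=' (rpl ' ' '=' '=' s.toList)))))))
      = scrub (fun c => (((false || c == '=') || c == '(') || c == ')') || c == ';')
          (fun c => (((false || c == '=') || c == '(') || c == ')') || c == ';') none s.toList :=
    phase _ _ ';' (by decide) (by decide) (by decide) (by decide) (by decide) s.toList _ h3
  have h5 : rpl ',' ' ' ',' (rpl ' ' ',' ',' (rpl ';' ' ' ';' (rpl ' ' ';' ';'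
        (rpl ')' ' ' ')' (rpl ' ' ')' ')' (rpl '(' ' ' '(' (rpl ' ' '(' '('
        (rpl '=' ' ' '=' (rpl ' ' '=' '=' s.toList)))))))))
      = scrub (fun c => ((((false || c == '=') || c == '(') || c == ')') || c == ';') || c == ',')
          (fun c => ((((false || c == '=') || c == '(') || c == ')') || c == ';') || c == ',')
          none s.toList :=
    phase _ _ ',' (by decide) (by decide) (by decide) (by decide) (by decide) s.toList _ h4
  have hB : postprocess_prediction_alt s =
      String.ofList (scrub (fun c => (['=', '(', ')', ';', ','] : List Char).contains c)
        (fun c => (['=', '(', ')', ';', ','] : List Char).contains c) none s.toList) := by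
    show String.ofList _ = _
    rw [show PySem.List.slice s.toList (some 1) none = s.toList.drop 1 by
      simp [PySem.List.slice_from]]
    rw [show ((none :: s.toList.map some).zip
          (s.toList.zip ((s.toList.drop 1).map some ++ [none]))) = ztrip none s.toList from rfl]
    rw [zip_scrub]
  rw [hA, h5, hB]
  congr 1
  apply scrub_congr <;>
    intro c <;> simp [beq_eq_decide, Bool.or_assoc]

-- ===== VERDICT (by name: the statement is the Claim_ definition above) =====
theorem postprocess_prediction_spec : Claim_equal_postprocess_prediction := by
  intro c_code _hdom
  unfold Spec_postprocess_prediction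
  exact ports_agree c_code
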